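-- pv_equiv track=rewrite | github.com/thebenkogan/everybody-codes-2025 | 13.py | calc_dial_with_ranges
-- ===== SOURCE A (Python) =====
-- def calc_dial_with_ranges(lines, index):
--     ranges = []
--     for line in lines:
--         a, b = map(int, line.split("-"))
--         ranges.append(range(a, b + 1))
--
--     dial = [1] * (len(ranges) + 1)
--     dial[0] = range(1, 2)
--     l, r = 1, len(dial) - 1
--     for i, rng in enumerate(ranges):
--         if i % 2 == 0:
--             dial[l] = rng
--             l += 1
--         else:
--             dial[r] = range(rng.stop - 1, rng.start - 1, -1)
--             r -= 1
--
--     size = sum(len(r) for r in dial)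
--     find = index % size
--     for rng in dial:
--         if len(rng) <= find:
--             find -= len(rng)
--             continue
--
--         return rng.start + (find * rng.step)
-- ===== SOURCE B (Python) =====
-- from bisect import bisect_right
-- from itertools import accumulate
--
--
-- def calc_dial_with_ranges(lines, index):
--     ranges = [range(a, b + 1) for a, b in (map(int, line.split("-")) for line in lines)]
--
--     evens = ranges[::2]
--     odds = ranges[1::2]
--     dial = (
--         [range(1, 2)]
--         + evens
--         + [range(r.stop - 1, r.start - 1, -1) for r in reversed(odds)]
--     )
--
--     pref = list(accumulate((len(r) for r in dial), initial=0))
--     find = index % pref[-1]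
--     i = bisect_right(pref, find) - 1
--     rng = dial[i]
--     return rng.start + (find - pref[i]) * rng.step
-- ===== Notes on version B (the rewrite author's own statement) =====
-- stated objective: alternative
-- what changed: B builds the dial by parity-splitting the ranges and concatenating (instead of A's in-place two-pointer index assignment into a preallocated list) and locates the answer with a prefix-sum table plus bisect_right binary search instead of A's linear length-subtracting scan.
import Mathlib
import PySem

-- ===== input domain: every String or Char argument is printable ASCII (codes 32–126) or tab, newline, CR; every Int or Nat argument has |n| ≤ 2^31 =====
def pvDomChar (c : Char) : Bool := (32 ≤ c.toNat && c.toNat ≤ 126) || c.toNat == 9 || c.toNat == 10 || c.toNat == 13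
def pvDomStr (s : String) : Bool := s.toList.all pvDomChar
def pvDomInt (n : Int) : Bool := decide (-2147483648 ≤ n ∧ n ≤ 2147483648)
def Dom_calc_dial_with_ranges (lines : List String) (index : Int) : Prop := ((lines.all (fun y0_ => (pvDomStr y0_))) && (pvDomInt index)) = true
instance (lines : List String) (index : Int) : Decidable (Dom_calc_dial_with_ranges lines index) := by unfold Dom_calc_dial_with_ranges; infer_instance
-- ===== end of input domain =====

-- B replaces A's in-place two-pointer dial fill by parity slicing plus list concatenation and replaces
-- A's linear length-subtracting scan by a prefix-sum table with binary search (bisect_right).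

-- A Python range(start, stop, step) is ported as the triple (start, stop, step) : Int × Int × Int.
-- pvRngLen is len() of such a range; it is exact for step = 1 and step = -1, the only steps either program builds.
def pvRngLen (r : Int × Int × Int) : Int :=
  if 0 < r.2.2 then max (r.2.1 - r.1) 0 else max (r.1 - r.2.1) 0

-- 'a, b = map(int, line.split("-"))' — none = ValueError (wrong arity or non-int part); shared by both programs verbatim
def pvParseLine (line : String) : Option (Int × Int) :=
  match (PySem.Str.split? line "-").getD [] with  -- sep "-" ≠ "": split? is always some
  | [s1, s2] =>
    match PySem.Int.ofStr? s1, PySem.Int.ofStr? s2 with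
    | some a, some b => some (a, b)
    | _, _ => none
  | _ => none

-- ===== PORT A =====
-- A's accumulating for-loop building 'ranges'
def pvRangesA : List String → Option (List (Int × Int × Int))
  | [] => some []
  | line :: rest =>
    match pvParseLine line with
    | none => none
    | some (a, b) =>
      match pvRangesA rest with
      | none => none
      | some rs => some ((a, b + 1, 1) :: rs)

-- 'for i, rng in enumerate(ranges): …' writing into dial at l / r
def pvFillGo : List (Int × Int × Int) → Nat → List (Int × Int × Int) → Nat → Nat → List (Int × Int × Int)
  | [], _, dial, _, _ => dial
  | rng :: rest, i, dial, l, r =>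
    if i % 2 = 0 then pvFillGo rest (i + 1) (dial.set l rng) (l + 1) r
    else pvFillGo rest (i + 1) (dial.set r (rng.2.1 - 1, rng.1 - 1, -1)) l (r - 1)

-- the final 'for rng in dial' loop; none = the Python falls off the loop returning None (unreachable)
def pvScanA : List (Int × Int × Int) → Int → Option Int
  | [], _ => none
  | r :: rest, find =>
    if pvRngLen r ≤ find then pvScanA rest (find - pvRngLen r)
    else some (r.1 + find * r.2.2)

def calc_dial_with_ranges (lines : List String) (index : Int) : Int :=
  match pvRangesA lines with
  | none => 0  -- A raises ValueError; excluded by Pre_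
  | some ranges =>
    let dial := pvFillGo ranges 0 ((1, 2, 1) :: List.replicate ranges.length (1, 1, 1)) 1 ranges.length
    let size := (dial.map pvRngLen).sum
    let find := PySem.Int.mod index size
    (pvScanA dial find).getD 0

-- ===== PORT B =====
-- B's generator-expression parse, one mapM
def pvRangesB (lines : List String) : Option (List (Int × Int × Int)) :=
  lines.mapM (fun line => (pvParseLine line).map (fun ab => (ab.1, ab.2 + 1, 1)))

-- '[r for i, r in enumerate(ranges) if i % 2 == 0]'
def pvEvens : List (Int × Int × Int) → Nat → List (Int × Int × Int)
  | [], _ => []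
  | r :: rest, i => if i % 2 = 0 then r :: pvEvens rest (i + 1) else pvEvens rest (i + 1)

-- '[r for i, r in enumerate(ranges) if i % 2 == 1]'
def pvOdds : List (Int × Int × Int) → Nat → List (Int × Int × Int)
  | [], _ => []
  | r :: rest, i => if i % 2 = 1 then r :: pvOdds rest (i + 1) else pvOdds rest (i + 1)

-- itertools.accumulate(…, initial=0)
def pvAccum : List Int → Int → List Int
  | [], acc => [acc]
  | x :: rest, acc => acc :: pvAccum rest (acc + x)

-- bisect.bisect_right(l, x) — CPython's lo/hi halving loop; the extra fuel argument only
-- makes the recursion structural (fuel = hi - lo suffices, and the caller passes l.length)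
def pvBisectGo (l : List Int) (x : Int) : Nat → Nat → Nat → Nat
  | 0, lo, _hi => lo
  | fuel + 1, lo, hi =>
    if lo < hi then
      let mid := (lo + hi) / 2
      if x < l.getD mid 0 then pvBisectGo l x fuel lo mid
      else pvBisectGo l x fuel (mid + 1) hi
    else lo

def calc_dial_with_ranges_alt (lines : List String) (index : Int) : Int :=
  match pvRangesB lines with
  | none => 0  -- ValueError; excluded by Pre_
  | some ranges =>
    let evens := pvEvens ranges 0
    let odds := pvOdds ranges 0
    let dial := ((1, 2, 1) : Int × Int × Int) :: (evens ++ (odds.reverse.map (fun r => (r.2.1 - 1, r.1 - 1, -1))))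
    let pref := pvAccum (dial.map pvRngLen) 0
    let size := (PySem.List.pyGet? pref (-1)).getD 0
    let find := PySem.Int.mod index size
    let i : Int := (pvBisectGo pref find pref.length 0 pref.length : Int) - 1
    let rng := (PySem.List.pyGet? dial i).getD (0, 0, 0)
    let pi := (PySem.List.pyGet? pref i).getD 0
    rng.1 + (find - pi) * rng.2.2

-- ===== PRECONDITION & SPEC =====
def pvLineOk (line : String) : Bool :=
  match (PySem.Str.split? line "-").getD [] with
  | [s1, s2] => (PySem.Int.ofStr? s1).isSome && (PySem.Int.ofStr? s2).isSome
  | _ => false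

-- Pre_ excludes exactly the inputs where A raises ValueError: a line whose split on "-" does not give
-- exactly two int()-parseable parts.
def Pre_calc_dial_with_ranges (lines : List String) (index : Int) : Prop :=
  ∀ line ∈ lines, pvLineOk line = true
instance (lines : List String) (index : Int) : Decidable (Pre_calc_dial_with_ranges lines index) := by
  unfold Pre_calc_dial_with_ranges; infer_instance

def pvWitness_calc_dial_with_ranges : List String × Int := (["1-3"], 5)

def Spec_calc_dial_with_ranges (lines : List String) (index : Int) (out : Int) : Prop := out = calc_dial_with_ranges_alt lines index
instance (lines : List String) (index : Int) (out : Int) : Decidable (Spec_calc_dial_with_ranges lines index out) := by unfold Spec_calc_dial_with_ranges; infer_instance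

-- ===== CLAIM (what is proved, stated in full; the proofs are below) =====
def Claim_equal_calc_dial_with_ranges : Prop := ∀ (lines : List String) (index : Int), Dom_calc_dial_with_ranges lines index → Pre_calc_dial_with_ranges lines index → Spec_calc_dial_with_ranges lines index (calc_dial_with_ranges lines index)

-- ===== LEMMAS AND PROOFS =====

lemma pvRngLen_nonneg (r : Int × Int × Int) : 0 ≤ pvRngLen r := by
  unfold pvRngLen; split <;> omega

lemma pvRangesB_eq (lines : List String) : pvRangesB lines = pvRangesA lines := by
  induction lines with
  | nil => rfl
  | cons l rest ih =>
    have ih' := ih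
    simp only [pvRangesB] at ih' ⊢
    rw [List.mapM_cons]
    cases h : pvParseLine l with
    | none => simp [pvRangesA, h]
    | some ab =>
      cases ab with
      | mk a b =>
        rw [ih']
        cases h2 : pvRangesA rest <;> simp [pvRangesA, h, h2]

lemma pvRangesA_isSome (lines : List String) (h : ∀ line ∈ lines, pvLineOk line = true) :
    (pvRangesA lines).isSome := by
  induction lines with
  | nil => rfl
  | cons l rest ih =>
    have h1 := h l (by simp)
    have h2 : (pvRangesA rest).isSome := ih (fun x hx => h x (by simp [hx]))
    unfold pvLineOk at h1
    unfold pvRangesA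
    cases hp : pvParseLine l with
    | none =>
      exfalso
      unfold pvParseLine at hp
      revert h1 hp
      cases (PySem.Str.split? l "-").getD [] with
      | nil => simp
      | cons s1 t =>
        cases t with
        | nil => simp
        | cons s2 t2 =>
          cases t2 with
          | nil =>
            cases h1 : PySem.Int.ofStr? s1 <;> cases h2 : PySem.Int.ofStr? s2 <;> simp [h1, h2]
          | cons _ _ => simp
    | some ab =>
      cases ab with
      | mk a b =>
        cases hr : pvRangesA rest with
        | none => rw [hr] at h2; simp at h2
        | some rs => simp

lemma pvSetMid {α : Type} (E t : List α) (x y : α) : (E ++ y :: t).set E.length x = E ++ x :: t := by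
  induction E with
  | nil => rfl
  | cons e E ih => simpa using ih

lemma fillGo_spec (ps : List (Int × Int × Int)) : ∀ (i : Nat) (head d : Int × Int × Int)
    (E O : List (Int × Int × Int)),
    pvFillGo ps i (head :: (E ++ (List.replicate ps.length d ++ O))) (1 + E.length) (E.length + ps.length)
    = head :: ((E ++ pvEvens ps i) ++ ((pvOdds ps i).reverse.map (fun r => (r.2.1 - 1, r.1 - 1, -1)) ++ O)) := by
  induction ps with
  | nil => intro i head d E O; simp [pvFillGo, pvEvens, pvOdds]
  | cons p rest ih =>
    intro i head d E O
    by_cases hp : i % 2 = 0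
    · have h1 : ¬ (i % 2 = 1) := by omega
      simp only [pvFillGo, pvEvens, pvOdds, hp, h1, if_true, if_false, List.length_cons,
        List.replicate_succ]
      have hset : (head :: (E ++ (d :: List.replicate rest.length d ++ O))).set (1 + E.length) p
          = head :: ((E ++ [p]) ++ (List.replicate rest.length d ++ O)) := by
        have : 1 + E.length = E.length + 1 := by omega
        rw [this, List.set_cons_succ]
        rw [show E ++ (d :: List.replicate rest.length d ++ O) = E ++ d :: (List.replicate rest.length d ++ O) from by simp]
        rw [pvSetMid]
        simp
      rw [hset]
      have := ih (i + 1) head d (E ++ [p]) O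
      simp only [List.length_append, List.length_singleton] at this
      rw [show 1 + E.length + 1 = 1 + (E.length + 1) from by omega,
          show E.length + (rest.length + 1) = E.length + 1 + rest.length from by omega]
      rw [this]
      simp [List.append_assoc]
    · have h1 : i % 2 = 1 := by omega
      simp only [pvFillGo, pvEvens, pvOdds, hp, h1, if_true, if_false, List.length_cons,
        List.replicate_succ']
      have hset : (head :: (E ++ ((List.replicate rest.length d ++ [d]) ++ O))).set (E.length + (rest.length + 1)) (p.2.1 - 1, p.1 - 1, -1)
          = head :: ((E ++ List.replicate rest.length d) ++ ((p.2.1 - 1, p.1 - 1, -1) :: O)) := by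
        rw [show E.length + (rest.length + 1) = ((E ++ List.replicate rest.length d).length) + 1 from by simp; omega]
        rw [List.set_cons_succ]
        rw [show E ++ ((List.replicate rest.length d ++ [d]) ++ O) = (E ++ List.replicate rest.length d) ++ d :: O from by simp]
        rw [pvSetMid]
      rw [hset]
      have := ih (i + 1) head d E ((p.2.1 - 1, p.1 - 1, -1) :: O)
      rw [show (E ++ List.replicate rest.length d) ++ ((p.2.1 - 1, p.1 - 1, -1) :: O)
            = E ++ (List.replicate rest.length d ++ ((p.2.1 - 1, p.1 - 1, -1) :: O)) from by simp]
      rw [show E.length + (rest.length + 1) - 1 = E.length + rest.length from by omega]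
      rw [this]
      simp [List.append_assoc]

lemma accum_length (xs : List Int) (acc : Int) : (pvAccum xs acc).length = xs.length + 1 := by
  induction xs generalizing acc with
  | nil => rfl
  | cons x rest ih => simp [pvAccum, ih]

lemma accum_getD (xs : List Int) (acc : Int) (k : Nat) (hk : k ≤ xs.length) :
    (pvAccum xs acc).getD k 0 = acc + ((xs.take k).sum) := by
  induction xs generalizing acc k with
  | nil => simp only [List.length_nil, Nat.le_zero] at hk; subst hk; simp [pvAccum]
  | cons x rest ih =>
    cases k with
    | zero => simp [pvAccum]
    | succ k' =>
      simp only [pvAccum, List.getD_cons_succ, List.take_succ_cons, List.sum_cons]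
      rw [ih (acc + x) k' (by simpa using hk)]
      ring

lemma accum_getLast (xs : List Int) (acc : Int) :
    PySem.List.pyGet? (pvAccum xs acc) (-1) = some (acc + xs.sum) := by
  rw [PySem.List.pyGet?_neg_one]
  induction xs generalizing acc with
  | nil => simp [pvAccum]
  | cons x rest ih =>
    simp only [pvAccum, List.sum_cons]
    cases hshape : pvAccum rest (acc + x) with
    | nil => cases rest <;> simp [pvAccum] at hshape
    | cons z L =>
      rw [List.getLast?_cons_cons]
      rw [← hshape, ih (acc + x)]; ring_nf

lemma sumTake_step (xs : List Int) (hnn : ∀ x ∈ xs, 0 ≤ x) (k : Nat) :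
    (xs.take k).sum ≤ (xs.take (k + 1)).sum := by
  rw [List.take_succ]
  cases h : xs[k]? with
  | none => simp
  | some v =>
    have : 0 ≤ v := hnn v (by exact List.mem_of_getElem? h)
    simp [this]

lemma sumTake_mono (xs : List Int) (hnn : ∀ x ∈ xs, 0 ≤ x) (j k : Nat) (h : j ≤ k) :
    (xs.take j).sum ≤ (xs.take k).sum := by
  induction k with
  | zero => simp_all
  | succ k' ih =>
    rcases Nat.lt_or_ge j (k' + 1) with hlt | hge
    · exact le_trans (ih (by omega)) (sumTake_step xs hnn k')
    · have : j = k' + 1 := by omega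
      subst this; rfl

lemma bisect_char (l : List Int) (x : Int)
    (hmono : ∀ j k : Nat, j ≤ k → k < l.length → l.getD j 0 ≤ l.getD k 0) :
    ∀ fuel lo hi, hi - lo ≤ fuel → lo ≤ hi → hi ≤ l.length →
    (∀ k, k < lo → l.getD k 0 ≤ x) → (∀ k, hi ≤ k → k < l.length → x < l.getD k 0) →
    lo ≤ pvBisectGo l x fuel lo hi ∧ pvBisectGo l x fuel lo hi ≤ hi ∧
    (∀ k, k < pvBisectGo l x fuel lo hi → l.getD k 0 ≤ x) ∧
    (∀ k, pvBisectGo l x fuel lo hi ≤ k → k < l.length → x < l.getD k 0) := by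
  intro fuel
  induction fuel with
  | zero =>
    intro lo hi hn hle hhi hlow hhigh
    have : hi = lo := by omega
    subst this
    exact ⟨le_refl _, le_refl _, hlow, fun k hk1 hk2 => hhigh k hk1 hk2⟩
  | succ fuel IH =>
    intro lo hi hn hle hhi hlow hhigh
    rw [pvBisectGo]
    by_cases h : lo < hi
    · rw [if_pos h]
      have hmid1 : lo ≤ (lo + hi) / 2 := by omega
      have hmid2 : (lo + hi) / 2 < hi := by omega
      by_cases hx : x < l.getD ((lo + hi) / 2) 0
      · simp only [if_pos hx]
        have hrec := IH lo ((lo + hi) / 2) (by omega) (by omega)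
          (by omega) hlow
          (by intro k hk1 hk2
              exact lt_of_lt_of_le hx (hmono _ k hk1 hk2))
        exact ⟨hrec.1, by omega, hrec.2.2.1, hrec.2.2.2⟩
      · simp only [if_neg hx]
        push_neg at hx
        have hrec := IH ((lo + hi) / 2 + 1) hi (by omega)
          (by omega) hhi
          (by intro k hk
              rcases Nat.lt_or_ge k lo with h' | h'
              · exact hlow k h'
              · exact le_trans (hmono k _ (by omega) (by omega)) hx)
          hhigh
        exact ⟨by omega, hrec.2.1, hrec.2.2.1, hrec.2.2.2⟩
    · rw [if_neg h]
      refine ⟨le_refl _, hle, hlow, ?_⟩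
      intro k hk1 hk2
      exact hhigh k (by omega) hk2

lemma scanA_spec : ∀ (dial : List (Int × Int × Int)) (i : Nat) (find : Int),
    i < dial.length →
    ((dial.map pvRngLen).take i).sum ≤ find →
    find < ((dial.map pvRngLen).take (i + 1)).sum →
    pvScanA dial find = some ((dial.getD i (0, 0, 0)).1 +
      (find - ((dial.map pvRngLen).take i).sum) * (dial.getD i (0, 0, 0)).2.2) := by
  intro dial
  induction dial with
  | nil => intro i find h; simp at h
  | cons d rest ih =>
    intro i find hi hlow hhigh
    cases i with
    | zero =>
      simp only [List.map_cons, List.take_succ_cons, List.take_zero, List.sum_cons,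
        List.sum_nil, List.getD_cons_zero] at *
      rw [pvScanA]
      rw [if_neg (by omega)]
      simp
    | succ k =>
      simp only [List.map_cons, List.take_succ_cons, List.sum_cons, List.getD_cons_succ,
        List.length_cons] at *
      have hnn : 0 ≤ ((rest.map pvRngLen).take k).sum :=
        List.sum_nonneg (by intro x hx
                            obtain ⟨r, _, rfl⟩ := List.mem_map.mp (List.mem_of_mem_take hx)
                            exact pvRngLen_nonneg r)
      have hd : pvRngLen d ≤ find := by omega
      rw [pvScanA, if_pos hd]
      rw [ih k (find - pvRngLen d) (by omega) (by omega) (by omega)]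
      ring_nf

lemma main_select (rest : List (Int × Int × Int)) (index : Int) :
    (pvScanA (((1, 2, 1) : Int × Int × Int) :: rest)
        (PySem.Int.mod index ((((1, 2, 1) : Int × Int × Int) :: rest).map pvRngLen).sum)).getD 0
    = (let dial := ((1, 2, 1) : Int × Int × Int) :: rest
       let pref := pvAccum (dial.map pvRngLen) 0
       let size := (PySem.List.pyGet? pref (-1)).getD 0
       let find := PySem.Int.mod index size
       let i : Int := (pvBisectGo pref find pref.length 0 pref.length : Int) - 1
       let rng := (PySem.List.pyGet? dial i).getD (0, 0, 0)
       let pi := (PySem.List.pyGet? pref i).getD 0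
       rng.1 + (find - pi) * rng.2.2) := by
  dsimp only
  set dial : List (Int × Int × Int) := (1, 2, 1) :: rest with hdial
  set S : List Int := dial.map pvRngLen with hS
  set pref : List Int := pvAccum S 0 with hpref
  have hSnn : ∀ y ∈ S, (0:Int) ≤ y := by
    intro y hy; obtain ⟨r, _, rfl⟩ := List.mem_map.mp hy; exact pvRngLen_nonneg r
  have hS0 : S = 1 :: rest.map pvRngLen := by
    simp [hS, hdial, pvRngLen]
  have hsum : (0:Int) < S.sum := by
    rw [hS0]; simp only [List.sum_cons]
    have : (0:Int) ≤ (rest.map pvRngLen).sum := List.sum_nonneg (by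
      intro y hy; obtain ⟨r, _, rfl⟩ := List.mem_map.mp hy; exact pvRngLen_nonneg r)
    omega
  rw [accum_getLast]
  simp only [Option.getD_some, zero_add]
  set find : Int := PySem.Int.mod index S.sum with hfind
  have hf0 : 0 ≤ find := PySem.Int.mod_nonneg index hsum
  have hf1 : find < S.sum := PySem.Int.mod_lt index hsum
  have hplen : pref.length = S.length + 1 := accum_length S 0
  have hmono : ∀ j k : Nat, j ≤ k → k < pref.length → pref.getD j 0 ≤ pref.getD k 0 := by
    intro j k hjk hk
    rw [accum_getD S 0 j (by omega), accum_getD S 0 k (by omega)]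
    have := sumTake_mono S hSnn j k hjk
    omega
  obtain ⟨hb1, hb2, hb3, hb4⟩ := bisect_char pref find hmono pref.length 0 pref.length
    (by omega) (by omega) (le_refl _) (by intro k hk; omega) (by intro k hk1 hk2; omega)
  set j : Nat := pvBisectGo pref find pref.length 0 pref.length with hj
  have h1j : 1 ≤ j := by
    by_contra h
    have hj0 : j = 0 := by omega
    have := hb4 0 (by omega) (by omega)
    rw [accum_getD S 0 0 (by omega)] at this
    simp at this; omega
  have hjlt : j < pref.length := by
    by_contra h
    have := hb3 (S.length) (by omega)
    rw [accum_getD S 0 S.length (le_refl _)] at this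
    rw [List.take_length] at this
    omega
  have hi1 : j - 1 < dial.length := by
    have : S.length = dial.length := by simp [hS]
    omega
  have hA : ((S.take (j - 1)).sum) ≤ find := by
    have := hb3 (j - 1) (by omega)
    rw [accum_getD S 0 (j - 1) (by omega)] at this
    omega
  have hB : find < ((S.take (j - 1 + 1)).sum) := by
    have := hb4 j (le_refl _) hjlt
    rw [accum_getD S 0 j (by omega)] at this
    have hjj : j - 1 + 1 = j := by omega
    rw [hjj]
    omega
  rw [scanA_spec dial (j - 1) find hi1 (by rw [← hS]; exact hA) (by rw [← hS]; exact hB)]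
  have hcast : (j : Int) - 1 = ((j - 1 : Nat) : Int) := by rw [Nat.cast_sub h1j]; simp
  rw [hcast]
  rw [PySem.List.pyGet?_natCast, PySem.List.pyGet?_natCast]
  rw [List.getElem?_eq_getElem hi1, List.getElem?_eq_getElem (by omega : j - 1 < pref.length)]
  simp only [Option.getD_some]
  have hprefi : pref[j - 1] = (S.take (j - 1)).sum := by
    have h2 : pref.getD (j - 1) 0 = 0 + (S.take (j - 1)).sum := accum_getD S 0 (j - 1) (by omega)
    rw [← List.getD_eq_getElem pref (0 : Int) (by omega : j - 1 < pref.length)]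
    omega
  have hdiali : dial.getD (j - 1) (0, 0, 0) = dial[j - 1] := List.getD_eq_getElem dial (0, 0, 0) hi1
  rw [hdiali, hprefi, ← hS]

-- ===== VERDICT (by name: the statement is the Claim_ definition above) =====
theorem calc_dial_with_ranges_spec : Claim_equal_calc_dial_with_ranges := by
  intro lines index _hdom hpre
  unfold Spec_calc_dial_with_ranges
  unfold calc_dial_with_ranges calc_dial_with_ranges_alt
  rw [pvRangesB_eq]
  have hs := pvRangesA_isSome lines hpre
  cases hr : pvRangesA lines with
  | none => simp [hr] at hs
  | some ranges =>
    dsimp only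
    have hfill := fillGo_spec ranges 0 (1, 2, 1) (1, 1, 1) [] []
    simp only [List.nil_append, List.length_nil, List.append_nil, Nat.add_zero, Nat.zero_add] at hfill
    rw [hfill]
    exact main_select _ index
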